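-- pv_equiv track=rewrite | github.com/VRYella/NBDFinder | motifs/g4_related.py | _g4hunter_base_scores
-- ===== SOURCE A (Python) =====
-- def _g4hunter_base_scores(seq):
--     """
--     Compute per-base G4Hunter scores (Bedrat et al. 2016):
--     - A/T: 0; G: +run_length (capped at 4); C: -run_length (capped at 4).
--     """
--     n = len(seq)
--     s = [0]*n
--     # Forward G-run
--     g_run = 0
--     for i, ch in enumerate(seq):
--         if ch == 'G':
--             g_run += 1
--         else:
--             g_run = 0
--         if ch == 'G':
--             s[i] = min(4, g_run)
--     # Forward C-run
--     c_run = 0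
--     for i, ch in enumerate(seq):
--         if ch == 'C':
--             c_run += 1
--         else:
--             c_run = 0
--         if ch == 'C':
--             s[i] = -min(4, c_run)
--         elif ch in ('A','T') and s[i]==0:
--             s[i] = 0
--     return s
-- ===== SOURCE B (Python) =====
-- def _g4hunter_base_scores(seq):
--     """Run-based single pass: split seq into maximal runs of identical
--     characters; a run of m 'G's scores 1,2,3,4,4,...; of 'C's the negatives;
--     any other run scores zeros."""
--     out = []
--     i, n = 0, len(seq)
--     while i < n:
--         ch = seq[i]
--         j = i
--         while j < n and seq[j] == ch:
--             j += 1
--         sign = 1 if ch == 'G' else (-1 if ch == 'C' else 0)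
--         out.extend(sign * min(4, k) for k in range(1, j - i + 1))
--         i = j
--     return out
-- ===== Notes on version B (the rewrite author's own statement) =====
-- stated objective: idiomatic
-- what changed: Replaces A's two index-writing passes (a forward G-run pass then a forward C-run pass mutating a preallocated zero list) by a single run-based traversal that splits the sequence into maximal runs of identical characters and emits each run's capped scores (sign*min(4,j)) directly.
import Mathlib
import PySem

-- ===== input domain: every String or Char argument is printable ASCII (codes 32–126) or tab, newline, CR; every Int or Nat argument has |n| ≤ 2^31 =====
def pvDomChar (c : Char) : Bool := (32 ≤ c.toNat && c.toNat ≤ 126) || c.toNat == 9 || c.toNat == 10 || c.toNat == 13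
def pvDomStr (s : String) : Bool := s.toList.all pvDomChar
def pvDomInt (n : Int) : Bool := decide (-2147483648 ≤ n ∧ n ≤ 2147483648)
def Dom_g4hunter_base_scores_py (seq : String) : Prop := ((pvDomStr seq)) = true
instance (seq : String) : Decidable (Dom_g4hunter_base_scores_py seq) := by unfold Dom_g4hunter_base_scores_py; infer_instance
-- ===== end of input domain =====

-- B replaces A's two index-writing passes (a G pass then a C pass over a zero array)
-- by one run-based traversal emitting each maximal run's capped scores directly (objective: idiomatic).

-- ===== PORT A =====
-- body of A's first loop ("Forward G-run"): state = (g_run, s)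
def pvStepG (st : Int × List Int) (ic : Int × Char) : Int × List Int :=
  let g := if ic.2 = 'G' then st.1 + 1 else (0 : Int)
  let s := if ic.2 = 'G' then PySem.List.pySetD st.2 ic.1 (min 4 g) else st.2
  (g, s)

-- body of A's second loop ("Forward C-run"): state = (c_run, s); the s[i] read uses
-- pyGetD (i is always in range here, so the default is never consulted)
def pvStepC (st : Int × List Int) (ic : Int × Char) : Int × List Int :=
  let c := if ic.2 = 'C' then st.1 + 1 else (0 : Int)
  let s := if ic.2 = 'C' then PySem.List.pySetD st.2 ic.1 (-(min 4 c))
           else if (ic.2 = 'A' ∨ ic.2 = 'T') ∧ PySem.List.pyGetD st.2 ic.1 0 = 0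
                then PySem.List.pySetD st.2 ic.1 0 else st.2
  (c, s)

def g4hunter_base_scores_py (seq : String) : List Int :=
  let cs := seq.toList
  let n := cs.length
  let s0 : List Int := List.replicate n 0
  let p1 := (PySem.List.enumerate cs).foldl pvStepG (0, s0)
  let p2 := (PySem.List.enumerate cs).foldl pvStepC (0, p1.2)
  p2.2

-- ===== PORT B =====
-- scores of one maximal run of length m whose character has the given sign
def pvRunScores (sign : Int) (m : Nat) : List Int :=
  (List.range m).map (fun (k : Nat) => sign * min 4 ((k : Int) + 1))

-- B's outer while loop: peel off one maximal run at a time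
def pvRuns : List Char → List Int
  | [] => []
  | ch :: t =>
    let run := t.takeWhile (fun x => x = ch)
    let rest := t.dropWhile (fun x => x = ch)
    let sign : Int := if ch = 'G' then 1 else if ch = 'C' then -1 else 0
    pvRunScores sign (run.length + 1) ++ pvRuns rest
termination_by cs => cs.length
decreasing_by
  simpa using Nat.lt_succ_of_le (List.length_dropWhile_le (fun x => x = ch) t)

def g4hunter_base_scores_py_alt (seq : String) : List Int := pvRuns seq.toList

-- ===== PRECONDITION & SPEC =====
def Spec_g4hunter_base_scores_py (seq : String) (out : List Int) : Prop := out = g4hunter_base_scores_py_alt seq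
instance (seq : String) (out : List Int) : Decidable (Spec_g4hunter_base_scores_py seq out) := by unfold Spec_g4hunter_base_scores_py; infer_instance

-- ===== CLAIM (what is proved, stated in full; the proofs are below) =====
def Claim_equal_g4hunter_base_scores_py : Prop := ∀ (seq : String), Dom_g4hunter_base_scores_py seq → Spec_g4hunter_base_scores_py seq (g4hunter_base_scores_py seq)

-- ===== LEMMAS AND PROOFS =====

-- Reference one-pass recursion both ports are reduced to: carries both run counters.
def pvCore : List Char → Int → Int → List Int
  | [], _, _ => []
  | ch :: t, g, c =>
    let g' := if ch = 'G' then g + 1 else 0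
    let c' := if ch = 'C' then c + 1 else 0
    (if ch = 'G' then min 4 g' else if ch = 'C' then -(min 4 c') else 0) :: pvCore t g' c'

-- What A's first pass leaves in s: G positions scored, everything else still 0.
def pvGpass : List Char → Int → List Int
  | [], _ => []
  | ch :: t, g =>
    let g' := if ch = 'G' then g + 1 else 0
    (if ch = 'G' then min 4 g' else 0) :: pvGpass t g'

lemma pass1_eq : ∀ (cs : List Char) (g : Int) (pre : List Int),
    ((PySem.List.enumerate cs (pre.length : Int)).foldl pvStepG
      (g, pre ++ List.replicate cs.length 0)).2 = pre ++ pvGpass cs g := by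
  intro cs
  induction cs with
  | nil => intro g pre; simp [PySem.List.enumerate, pvGpass]
  | cons ch t ih =>
    intro g pre
    rw [PySem.List.enumerate_cons]
    simp only [List.foldl_cons]
    have hset : ∀ v : Int,
        (pre ++ (0 : Int) :: List.replicate t.length 0).set pre.length v
          = pre ++ v :: List.replicate t.length 0 := by
      intro v; simp
    have hstep : pvStepG (g, pre ++ List.replicate (ch :: t).length 0) ((pre.length : Int), ch)
        = (if ch = 'G' then g + 1 else 0,
           (pre ++ [if ch = 'G' then min 4 (g + 1) else 0]) ++ List.replicate t.length 0) := by
      simp only [pvStepG, List.length_cons, List.replicate_succ, PySem.List.pySetD_natCast]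
      by_cases h : ch = 'G' <;> simp [h, hset]
    rw [hstep]
    have hlen : ((pre.length : Int) + 1) = (((pre ++ [if ch = 'G' then min 4 (g + 1) else 0]).length : Nat) : Int) := by
      simp
    rw [hlen, ih]
    by_cases h : ch = 'G' <;> simp [pvGpass, h]

lemma pass2_eq : ∀ (cs : List Char) (g c : Int) (pre : List Int),
    ((PySem.List.enumerate cs (pre.length : Int)).foldl pvStepC
      (c, pre ++ pvGpass cs g)).2 = pre ++ pvCore cs g c := by
  intro cs
  induction cs with
  | nil => intro g c pre; simp [PySem.List.enumerate, pvCore, pvGpass]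
  | cons ch t ih =>
    intro g c pre
    rw [PySem.List.enumerate_cons]
    simp only [List.foldl_cons]
    have hget : ∀ (h : Int) (l : List Int),
        PySem.List.pyGetD (pre ++ h :: l) (pre.length : Int) 0 = h := by
      intro h l; rw [PySem.List.pyGetD_natCast]; simp [List.getD]
    have hset : ∀ (h w : Int) (l : List Int),
        (pre ++ h :: l).set pre.length w = pre ++ w :: l := by
      intro h w l; simp
    by_cases hG : ch = 'G'
    · subst hG
      have hstep : pvStepC (c, pre ++ pvGpass ('G' :: t) g) ((pre.length : Int), 'G')
          = (0, (pre ++ [min 4 (g + 1)]) ++ pvGpass t (g + 1)) := by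
        simp [pvStepC, pvGpass, hget]
      rw [hstep,
        show ((pre.length : Int) + 1) = (((pre ++ [min 4 (g + 1)]).length : Nat) : Int) by simp,
        ih]
      simp [pvCore]
    · by_cases hC : ch = 'C'
      · subst hC
        have hstep : pvStepC (c, pre ++ pvGpass ('C' :: t) g) ((pre.length : Int), 'C')
            = (c + 1, (pre ++ [-(min 4 (c + 1))]) ++ pvGpass t 0) := by
          simp [pvStepC, pvGpass, hset]
        rw [hstep,
          show ((pre.length : Int) + 1) = (((pre ++ [-(min 4 (c + 1))]).length : Nat) : Int) by simp,
          ih]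
        simp [pvCore]
      · by_cases hAT : ch = 'A' ∨ ch = 'T'
        · have hstep : pvStepC (c, pre ++ pvGpass (ch :: t) g) ((pre.length : Int), ch)
              = (0, (pre ++ [(0 : Int)]) ++ pvGpass t 0) := by
            simp [pvStepC, pvGpass, hG, hC, hAT, hget, hset]
          rw [hstep,
            show ((pre.length : Int) + 1) = (((pre ++ [(0 : Int)]).length : Nat) : Int) by simp,
            ih]
          simp [pvCore, hG, hC]
        · have hstep : pvStepC (c, pre ++ pvGpass (ch :: t) g) ((pre.length : Int), ch)
              = (0, (pre ++ [(0 : Int)]) ++ pvGpass t 0) := by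
            simp [pvStepC, pvGpass, hG, hC, hAT]
          rw [hstep,
            show ((pre.length : Int) + 1) = (((pre ++ [(0 : Int)]).length : Nat) : Int) by simp,
            ih]
          simp [pvCore, hG, hC]

lemma A_eq_core (seq : String) : g4hunter_base_scores_py seq = pvCore seq.toList 0 0 := by
  have h1 := pass1_eq seq.toList 0 []
  have h2 := pass2_eq seq.toList 0 0 []
  simp only [List.nil_append, List.length_nil, Nat.cast_zero] at h1 h2
  show ((PySem.List.enumerate seq.toList 0).foldl pvStepC
      (0, ((PySem.List.enumerate seq.toList 0).foldl pvStepG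
            (0, List.replicate seq.toList.length 0)).2)).2 = pvCore seq.toList 0 0
  rw [h1, h2]

-- head of dropWhile does not satisfy the predicate
lemma head_dropWhile {p : Char → Bool} : ∀ (l : List Char) (x : Char),
    (l.dropWhile p).head? = some x → p x = false := by
  intro l
  induction l with
  | nil => intro x h; simp at h
  | cons a t ih =>
    intro x h
    by_cases ha : p a
    · rw [List.dropWhile_cons_of_pos ha] at h; exact ih x h
    · rw [List.dropWhile_cons_of_neg ha] at h
      simp at h; subst h; simpa using ha

lemma core_g_irrel : ∀ (t : List Char) (g₁ g₂ c : Int),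
    (∀ x, t.head? = some x → x ≠ 'G') → pvCore t g₁ c = pvCore t g₂ c := by
  intro t g₁ g₂ c h
  cases t with
  | nil => rfl
  | cons ch r =>
    have : ch ≠ 'G' := h ch rfl
    simp [pvCore, this]

lemma core_c_irrel : ∀ (t : List Char) (g c₁ c₂ : Int),
    (∀ x, t.head? = some x → x ≠ 'C') → pvCore t g c₁ = pvCore t g c₂ := by
  intro t g c₁ c₂ h
  cases t with
  | nil => rfl
  | cons ch r =>
    have : ch ≠ 'C' := h ch rfl
    simp [pvCore, this]

lemma core_run_G : ∀ (m : Nat) (rest : List Char) (g : Int),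
    pvCore (List.replicate m 'G' ++ rest) g 0
      = (List.range m).map (fun (k : Nat) => min 4 (g + (k : Int) + 1)) ++ pvCore rest (g + m) 0 := by
  intro m
  induction m with
  | zero => intro rest g; simp
  | succ n ih =>
    intro rest g
    rw [List.replicate_succ, List.cons_append]
    have hhd : pvCore ('G' :: (List.replicate n 'G' ++ rest)) g 0
        = min 4 (g + 1) :: pvCore (List.replicate n 'G' ++ rest) (g + 1) 0 := by
      simp [pvCore]
    rw [hhd, ih rest (g + 1), List.range_succ_eq_map, List.map_cons, List.map_map,
      List.cons_append]
    refine congrArg₂ _ (by norm_num) (congrArg₂ _ ?_ ?_)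
    · refine List.map_congr_left (fun k _ => ?_)
      simp only [Function.comp_apply]
      congr 1
      push_cast
      ring
    · congr 1
      push_cast
      ring

lemma core_run_C : ∀ (m : Nat) (rest : List Char) (c : Int),
    pvCore (List.replicate m 'C' ++ rest) 0 c
      = (List.range m).map (fun (k : Nat) => -(min 4 (c + (k : Int) + 1))) ++ pvCore rest 0 (c + m) := by
  intro m
  induction m with
  | zero => intro rest c; simp
  | succ n ih =>
    intro rest c
    rw [List.replicate_succ, List.cons_append]
    have hhd : pvCore ('C' :: (List.replicate n 'C' ++ rest)) 0 c
        = -(min 4 (c + 1)) :: pvCore (List.replicate n 'C' ++ rest) 0 (c + 1) := by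
      simp [pvCore]
    rw [hhd, ih rest (c + 1), List.range_succ_eq_map, List.map_cons, List.map_map,
      List.cons_append]
    refine congrArg₂ _ (by norm_num) (congrArg₂ _ ?_ ?_)
    · refine List.map_congr_left (fun k _ => ?_)
      simp only [Function.comp_apply]
      congr 2
      push_cast
      ring
    · congr 1
      push_cast
      ring

lemma core_run_other : ∀ (m : Nat) (ch : Char) (rest : List Char),
    ch ≠ 'G' → ch ≠ 'C' →
    pvCore (List.replicate m ch ++ rest) 0 0
      = List.replicate m 0 ++ pvCore rest 0 0 := by
  intro m ch rest hG hC
  induction m with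
  | zero => simp
  | succ n ih =>
    rw [List.replicate_succ, List.cons_append]
    simp [pvCore, hG, hC, ih, List.replicate_succ]

lemma B_eq_core_aux : ∀ (n : Nat) (cs : List Char), cs.length ≤ n → pvRuns cs = pvCore cs 0 0 := by
  intro n
  induction n with
  | zero =>
    intro cs h
    have : cs = [] := List.eq_nil_of_length_eq_zero (Nat.le_zero.mp h)
    subst this
    simp [pvRuns, pvCore]
  | succ n ih =>
    intro cs h
    cases cs with
    | nil => simp [pvRuns, pvCore]
    | cons ch t =>
      have ht : t = t.takeWhile (fun x => x = ch) ++ t.dropWhile (fun x => x = ch) :=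
        (List.takeWhile_append_dropWhile).symm
      have hrep : t.takeWhile (fun x => x = ch)
          = List.replicate (t.takeWhile (fun x => x = ch)).length ch := by
        apply List.eq_replicate_of_mem
        intro b hb
        have := List.mem_takeWhile_imp hb
        exact of_decide_eq_true this
      have hdec : ch :: t
          = List.replicate ((t.takeWhile (fun x => x = ch)).length + 1) ch
              ++ t.dropWhile (fun x => x = ch) := by
        rw [List.replicate_succ, List.cons_append, ← hrep]
        exact congrArg (ch :: ·) ht
      have hhead : ∀ x, (t.dropWhile (fun x => x = ch)).head? = some x → x ≠ ch := by
        intro x hx hxc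
        have := head_dropWhile t x hx
        simp [hxc] at this
      have hlen : (t.dropWhile (fun x => x = ch)).length ≤ n := by
        have h1 : t.length ≤ n := Nat.le_of_succ_le_succ h
        exact le_trans (List.length_dropWhile_le _ _) h1
      rw [pvRuns]
      by_cases hG : ch = 'G'
      · subst hG
        conv_rhs => rw [hdec, core_run_G]
        refine congrArg₂ _ ?_ ?_
        · simp only [pvRunScores]
          refine List.map_congr_left (fun k _ => ?_)
          simp
        · rw [core_g_irrel _ _ 0 0 (fun x hx => hhead x hx), ih _ hlen]
      · by_cases hC : ch = 'C'
        · subst hC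
          conv_rhs => rw [hdec, core_run_C]
          refine congrArg₂ _ ?_ ?_
          · simp only [pvRunScores]
            refine List.map_congr_left (fun k _ => ?_)
            simp
          · rw [core_c_irrel _ 0 _ 0 (fun x hx => hhead x hx), ih _ hlen]
        · conv_rhs => rw [hdec, core_run_other _ ch _ hG hC]
          refine congrArg₂ _ ?_ (ih _ hlen)
          simp [pvRunScores, hG, hC]

lemma B_eq_core (cs : List Char) : pvRuns cs = pvCore cs 0 0 :=
  B_eq_core_aux cs.length cs le_rfl

-- ===== VERDICT (by name: the statement is the Claim_ definition above) =====
theorem g4hunter_base_scores_py_spec : Claim_equal_g4hunter_base_scores_py := by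
  intro seq _
  unfold Spec_g4hunter_base_scores_py g4hunter_base_scores_py_alt
  rw [A_eq_core, B_eq_core]
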